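-- pv_equiv track=rewrite | github.com/Miguel-Ojeda/Pycharm_Projects | proyectos anteriores/PyWork50/ch 10 iterators/50 ext 03 myrange con gen.py | my_range
-- ===== SOURCE A (Python) =====
-- def my_range(first, second=None, step=1):
--     if second is None:
--         index = 0
--         limit = first
--     else:
--         index = first
--         limit = second
--
--     while index < limit:
--         yield index
--         index += step
-- ===== SOURCE B (Python) =====
-- def my_range(first, second=None, step=1):
--     start, limit = (0, first) if second is None else (first, second)
--     if start < limit:
--         n = -((start - limit) // step)  # ceil((limit-start)/step)
--         yield from (start + i * step for i in range(n))
-- ===== Notes on version B (the rewrite author's own statement) =====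
-- stated objective: alternative
-- what changed: Replaced the while/yield repeated-addition loop by a closed-form count n = ceil((limit-start)/step) and a single generator expression over range(n).
import Mathlib
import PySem

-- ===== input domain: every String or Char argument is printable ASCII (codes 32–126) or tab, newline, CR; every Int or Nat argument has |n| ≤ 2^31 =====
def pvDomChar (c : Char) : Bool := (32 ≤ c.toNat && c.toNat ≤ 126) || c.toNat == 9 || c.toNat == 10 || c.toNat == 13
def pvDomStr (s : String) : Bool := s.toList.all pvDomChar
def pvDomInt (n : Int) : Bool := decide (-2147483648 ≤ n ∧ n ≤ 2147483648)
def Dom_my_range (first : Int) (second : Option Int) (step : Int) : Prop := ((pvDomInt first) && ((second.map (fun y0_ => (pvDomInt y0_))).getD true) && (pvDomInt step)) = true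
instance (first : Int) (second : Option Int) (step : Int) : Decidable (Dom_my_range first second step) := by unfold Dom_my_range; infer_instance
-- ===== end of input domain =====

-- B replaces A's while/yield repeated-addition loop by a closed-form element count
-- (ceiling division) and one map over range(n); same cost, different decomposition.

-- ===== PORT A =====
-- the 'while index < limit: yield index; index += step' loop of A;
-- the '0 < step' conjunct is only a totality guard (when step ≤ 0 and index < limit the Python loop never terminates; such inputs are outside Pre_)
def myRangeLoop (index limit step : Int) : List Int :=
  if _h : 0 < step ∧ index < limit then
    index :: myRangeLoop (index + step) limit step
  else []
termination_by (limit - index).toNat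
decreasing_by omega

def my_range (first : Int) (second : Option Int) (step : Int) : List Int :=
  match second with
  | none => myRangeLoop 0 first step
  | some s => myRangeLoop first s step

-- ===== PORT B =====
def my_range_alt (first : Int) (second : Option Int) (step : Int) : List Int :=
  let p : Int × Int := match second with | none => (0, first) | some s => (first, s)
  if p.1 < p.2 then
    (PySem.List.pyRange 0 (-(PySem.Int.floordiv (p.1 - p.2) step)) 1).map
      (fun i => p.1 + i * step)
  else []

-- ===== PRECONDITION & SPEC =====
-- Pre_ excludes exactly the inputs on which A's generator never terminates
-- (step ≤ 0 while the start lies below the limit); A returns no value there.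
def Pre_my_range (first : Int) (second : Option Int) (step : Int) : Prop :=
  0 < step ∨ (match second with | none => first ≤ 0 | some s => s ≤ first)
instance (first : Int) (second : Option Int) (step : Int) : Decidable (Pre_my_range first second step) := by unfold Pre_my_range; cases second <;> infer_instance

def pvWitness_my_range : Int × Option Int × Int := (2, some 9, 3)

def Spec_my_range (first : Int) (second : Option Int) (step : Int) (out : List Int) : Prop := out = my_range_alt first second step
instance (first : Int) (second : Option Int) (step : Int) (out : List Int) : Decidable (Spec_my_range first second step out) := by unfold Spec_my_range; infer_instance

-- ===== CLAIM (what is proved, stated in full; the proofs are below) =====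
def Claim_equal_my_range : Prop := ∀ (first : Int) (second : Option Int) (step : Int), Dom_my_range first second step → Pre_my_range first second step → Spec_my_range first second step (my_range first second step)

-- ===== LEMMAS AND PROOFS =====

-- advancing the start by one step drops the ceiling count by one
lemma floordiv_add_self (a step : Int) (hs : 0 < step) :
    PySem.Int.floordiv (a + step) step = PySem.Int.floordiv a step + 1 := by
  have h := (PySem.Int.floordiv_eq_iff_of_pos (a := a) (b := step) (q := PySem.Int.floordiv a step) hs).mp rfl
  refine (PySem.Int.floordiv_eq_iff_of_pos (a := a + step) (b := step) (q := PySem.Int.floordiv a step + 1) hs).mpr ⟨?_, ?_⟩ <;> nlinarith [h.1, h.2]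

-- A's loop equals B's closed-form map, for any positive step
lemma myRangeLoop_eq (step : Int) (hs : 0 < step) :
    ∀ (index limit : Int),
      myRangeLoop index limit step =
        if index < limit then
          (PySem.List.pyRange 0 (-(PySem.Int.floordiv (index - limit) step)) 1).map
            (fun i => index + i * step)
        else [] := by
  intro index limit
  generalize hm : (limit - index).toNat = m
  induction m using Nat.strong_induction_on generalizing index with
  | _ m ih =>
    rw [myRangeLoop]
    by_cases hlt : index < limit
    · simp only [hs, hlt, and_self, dif_pos, if_pos]
      set n : Int := -(PySem.Int.floordiv (index - limit) step) with hn
      have hfd : PySem.Int.floordiv (index - limit) step < 0 := by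
        rw [PySem.Int.floordiv_lt_iff_lt_mul hs]; nlinarith
      have hnpos : 0 < n := by omega
      have hrec : myRangeLoop (index + step) limit step =
          if index + step < limit then
            (PySem.List.pyRange 0 (-(PySem.Int.floordiv (index + step - limit) step)) 1).map
              (fun i => (index + step) + i * step)
          else [] := by
        rcases lt_or_ge (index + step) limit with h2 | h2
        · exact ih (limit - (index + step)).toNat (by omega) (index + step) rfl
        · rw [myRangeLoop]; simp [h2, show ¬ (0 < step ∧ index + step < limit) by omega]
      have hshift : PySem.Int.floordiv (index + step - limit) step
          = PySem.Int.floordiv (index - limit) step + 1 := by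
        have := floordiv_add_self (index - limit) step hs
        rw [show index + step - limit = index - limit + step by ring, this]
      rw [hrec]
      by_cases h2 : index + step < limit
      · -- both lists nonempty: peel the head of the pyRange
        rw [if_pos h2]
        rw [PySem.List.pyRange_one_cons (by omega : (0:Int) < n)]
        simp only [List.map_cons, zero_mul, add_zero]
        congr 1
        have : -(PySem.Int.floordiv (index + step - limit) step) = n - 1 := by
          rw [hshift]; omega
        rw [this, PySem.List.pyRange_one, PySem.List.pyRange_one]
        simp only [List.map_map]
        rw [show n - (0 + 1) = n - 1 - 0 by ring]
        apply List.map_congr_left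
        intro k _
        simp only [Function.comp_apply]
        push_cast
        ring
      · -- exactly one element left
        rw [if_neg h2]
        have hn1 : n = 1 := by
          have : -(PySem.Int.floordiv (index + step - limit) step) ≤ 0 := by
            have : 0 ≤ PySem.Int.floordiv (index + step - limit) step := by
              rw [← not_lt, PySem.Int.floordiv_lt_iff_lt_mul hs]; omega
            omega
          omega
        rw [hn1, show PySem.List.pyRange 0 1 1 = [0] from by decide]
        simp
    · simp [hlt]

lemma my_range_eq_alt (first : Int) (second : Option Int) (step : Int)
    (hpre : Pre_my_range first second step) :
    my_range first second step = my_range_alt first second step := by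
  unfold Pre_my_range at hpre
  cases second with
  | none =>
    show myRangeLoop 0 first step = _
    unfold my_range_alt
    rcases hpre with hs | hle
    · rw [myRangeLoop_eq step hs 0 first]
    · rw [myRangeLoop]
      simp [show ¬ ((0:Int) < first) by omega]
  | some s =>
    show myRangeLoop first s step = _
    unfold my_range_alt
    rcases hpre with hs | hle
    · rw [myRangeLoop_eq step hs first s]
    · rw [myRangeLoop]
      simp [show ¬ (first < s) by omega]

-- ===== VERDICT (by name: the statement is the Claim_ definition above) =====
theorem my_range_spec : Claim_equal_my_range := by
  intro first second step _ hpre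
  exact my_range_eq_alt first second step hpre
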